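-- pv_equiv track=rewrite | github.com/VHWeng/ASR-Language-Training-EX | utils/text_processing.py | text_to_ipa_modern
-- ===== SOURCE A (Python) =====
-- def text_to_ipa_modern(text):
--     """
--     Convert English text to modern, accurate IPA pronunciation
--     Uses a mapping-based approach
--     """
--     # Enhanced English to IPA mapping with better accuracy
--     ipa_map = {
--         # Vowels - short
--         'a': 'æ', 'e': 'ɛ', 'i': 'ɪ', 'o': 'ɒ', 'u': 'ʌ',
--         # Vowels - long
--         'aa': 'ɑː', 'ee': 'iː', 'ii': 'aɪ', 'oo': 'uː', 'uu': 'uː',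
--         # Consonants
--         'b': 'b', 'c': 'k', 'd': 'd', 'f': 'f', 'g': 'ɡ',
--         'h': 'h', 'j': 'dʒ', 'k': 'k', 'l': 'l', 'm': 'm',
--         'n': 'n', 'p': 'p', 'q': 'k', 'r': 'ɹ', 's': 's',
--         't': 't', 'v': 'v', 'w': 'w', 'x': 'ks', 'y': 'j', 'z': 'z',
--         # Common digraphs and trigraphs
--         'th': 'θ', 'ch': 'tʃ', 'sh': 'ʃ', 'ph': 'f', 'wh': 'ʍ',
--         'ck': 'k', 'qu': 'kw', 'ng': 'ŋ', 'gh': 'ɡ', 'sc': 'sk',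
--         'sch': 'sk', 'scr': 'skɹ', 'shr': 'ʃɹ', 'thr': 'θɹ',
--         # Vowel combinations - diphthongs
--         'ai': 'eɪ', 'ay': 'eɪ', 'au': 'ɔː', 'aw': 'ɔː',
--         'ea': 'iː', 'ee': 'iː', 'ei': 'aɪ', 'ey': 'aɪ',
--         'ie': 'aɪ', 'oa': 'əʊ', 'oo': 'uː', 'ou': 'aʊ', 'ow': 'aʊ',
--         'ue': 'uː', 'ui': 'aɪ', 'ew': 'juː', 'oi': 'ɔɪ', 'oy': 'ɔɪ',
--         'ar': 'ɑː', 'er': 'ɜː', 'ir': 'ɜː', 'or': 'ɔː', 'ur': 'ɜː',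
--         # Silent letters and special cases
--         'kn': 'n', 'gn': 'n', 'wr': 'ɹ', 'mb': 'm',
--         # Common words and phrases
--         'the': 'ðə', 'and': 'ənd', 'of': 'əv', 'to': 'tu', 'in': 'ɪn',
--         'is': 'ɪz', 'it': 'ɪt', 'you': 'juː', 'he': 'hiː', 'she': 'ʃiː',
--         'we': 'wiː', 'they': 'ðeɪ', 'are': 'ɑː', 'was': 'wɒz', 'were': 'wɜː',
--         'have': 'hæv', 'has': 'hæz', 'had': 'hæd', 'do': 'duː', 'does': 'dʌz',
--         'did': 'dɪd', 'will': 'wɪl', 'would': 'wʊd', 'can': 'kæn', 'could': 'kʊd',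
--         'shall': 'ʃæl', 'should': 'ʃʊd', 'may': 'meɪ', 'might': 'maɪt',
--         'must': 'mʌst', 'ought': 'ɔːt', 'need': 'niːd'
--     }
--
--     # Preprocessing
--     text = text.lower().strip()
--     words = text.split()
--     ipa_words = []
--
--     for word in words:
--         # Remove punctuation for processing but keep it for output
--         clean_word = ''.join(c for c in word if c.isalnum())
--         punctuation = ''.join(c for c in word if not c.isalnum())
--
--         if not clean_word:
--             if punctuation:
--                 ipa_words.append(punctuation)
--             continue
--
--         # Convert the clean word
--         ipa_word = ""
--         i = 0
--
--         while i < len(clean_word):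
--             matched = False
--
--             # Check for longest possible matches first
--             # Check trigraphs
--             if i <= len(clean_word) - 3:
--                 trigraph = clean_word[i:i+3]
--                 if trigraph in ipa_map:
--                     ipa_word += ipa_map[trigraph]
--                     i += 3
--                     matched = True
--                     continue
--
--             # Check digraphs
--             if i <= len(clean_word) - 2:
--                 digraph = clean_word[i:i+2]
--                 if digraph in ipa_map:
--                     ipa_word += ipa_map[digraph]
--                     i += 2
--                     matched = True
--                     continue
--
--             # Check single characters
--             char = clean_word[i]
--             if char in ipa_map:
--                 ipa_word += ipa_map[char]
--             elif char.isalpha():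
--                 # Unknown letters - use closest approximation
--                 ipa_word += char
--
--             i += 1
--
--         # Add back punctuation
--         if punctuation:
--             ipa_word += punctuation
--
--         ipa_words.append(ipa_word)
--
--     return ' '.join(ipa_words)
-- ===== SOURCE B (Python) =====
-- def text_to_ipa_modern(text):
--     """
--     Convert English text to modern, accurate IPA pronunciation.
--     Same mapping as the original, but instead of the hard-coded
--     trigraph/digraph/single-char cascade, the n-gram keys (length <= 3,
--     the only ones the greedy matcher can reach) are pre-indexed by their
--     first character, each bucket sorted by descending key length; the
--     inner loop does one bucket lookup and takes the first prefix match.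
--     """
--     ipa_map = {
--         # Vowels - short
--         'a': 'æ', 'e': 'ɛ', 'i': 'ɪ', 'o': 'ɒ', 'u': 'ʌ',
--         # Vowels - long
--         'aa': 'ɑː', 'ee': 'iː', 'ii': 'aɪ', 'oo': 'uː', 'uu': 'uː',
--         # Consonants
--         'b': 'b', 'c': 'k', 'd': 'd', 'f': 'f', 'g': 'ɡ',
--         'h': 'h', 'j': 'dʒ', 'k': 'k', 'l': 'l', 'm': 'm',
--         'n': 'n', 'p': 'p', 'q': 'k', 'r': 'ɹ', 's': 's',
--         't': 't', 'v': 'v', 'w': 'w', 'x': 'ks', 'y': 'j', 'z': 'z',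
--         # Common digraphs and trigraphs
--         'th': 'θ', 'ch': 'tʃ', 'sh': 'ʃ', 'ph': 'f', 'wh': 'ʍ',
--         'ck': 'k', 'qu': 'kw', 'ng': 'ŋ', 'gh': 'ɡ', 'sc': 'sk',
--         'sch': 'sk', 'scr': 'skɹ', 'shr': 'ʃɹ', 'thr': 'θɹ',
--         # Vowel combinations - diphthongs
--         'ai': 'eɪ', 'ay': 'eɪ', 'au': 'ɔː', 'aw': 'ɔː',
--         'ea': 'iː', 'ee': 'iː', 'ei': 'aɪ', 'ey': 'aɪ',
--         'ie': 'aɪ', 'oa': 'əʊ', 'oo': 'uː', 'ou': 'aʊ', 'ow': 'aʊ',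
--         'ue': 'uː', 'ui': 'aɪ', 'ew': 'juː', 'oi': 'ɔɪ', 'oy': 'ɔɪ',
--         'ar': 'ɑː', 'er': 'ɜː', 'ir': 'ɜː', 'or': 'ɔː', 'ur': 'ɜː',
--         # Silent letters and special cases
--         'kn': 'n', 'gn': 'n', 'wr': 'ɹ', 'mb': 'm',
--         # Common words and phrases
--         'the': 'ðə', 'and': 'ənd', 'of': 'əv', 'to': 'tu', 'in': 'ɪn',
--         'is': 'ɪz', 'it': 'ɪt', 'you': 'juː', 'he': 'hiː', 'she': 'ʃiː',
--         'we': 'wiː', 'they': 'ðeɪ', 'are': 'ɑː', 'was': 'wɒz', 'were': 'wɜː',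
--         'have': 'hæv', 'has': 'hæz', 'had': 'hæd', 'do': 'duː', 'does': 'dʌz',
--         'did': 'dɪd', 'will': 'wɪl', 'would': 'wʊd', 'can': 'kæn', 'could': 'kʊd',
--         'shall': 'ʃæl', 'should': 'ʃʊd', 'may': 'meɪ', 'might': 'maɪt',
--         'must': 'mʌst', 'ought': 'ɔːt', 'need': 'niːd'
--     }
--     # Index the reachable n-gram keys (len <= 3) by first character,
--     # each bucket in descending key length (stable, so greedy
--     # trigraph > digraph > single priority is preserved).
--     index = {}
--     for k, v in ipa_map.items():
--         if len(k) <= 3: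
--             index.setdefault(k[0], []).append((k, v))
--     for lst in index.values():
--         lst.sort(key=lambda kv: len(kv[0]), reverse=True)
--
--     ipa_words = []
--     for word in text.lower().strip().split():
--         clean_word = ''.join(c for c in word if c.isalnum())
--         punctuation = ''.join(c for c in word if not c.isalnum())
--         if not clean_word:
--             if punctuation:
--                 ipa_words.append(punctuation)
--             continue
--         pieces = []
--         i = 0
--         while i < len(clean_word):
--             for k, v in index.get(clean_word[i], []):
--                 if clean_word.startswith(k, i):
--                     pieces.append(v)
--                     i += len(k)
--                     break
--             else:
--                 if clean_word[i].isalpha():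
--                     pieces.append(clean_word[i])
--                 i += 1
--         ipa_words.append(''.join(pieces) + punctuation)
--     return ' '.join(ipa_words)
-- ===== Notes on version B (the rewrite author's own statement) =====
-- stated objective: alternative
-- what changed: A's hard-coded trigraph/digraph/single-char cascade with three dict probes per position is replaced by a precomputed index from first character to that character's n-gram (key, value) pairs sorted by descending key length; the inner loop does one bucket lookup and takes the first prefix match, which reproduces the greedy longest-first priority.
import Mathlib
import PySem

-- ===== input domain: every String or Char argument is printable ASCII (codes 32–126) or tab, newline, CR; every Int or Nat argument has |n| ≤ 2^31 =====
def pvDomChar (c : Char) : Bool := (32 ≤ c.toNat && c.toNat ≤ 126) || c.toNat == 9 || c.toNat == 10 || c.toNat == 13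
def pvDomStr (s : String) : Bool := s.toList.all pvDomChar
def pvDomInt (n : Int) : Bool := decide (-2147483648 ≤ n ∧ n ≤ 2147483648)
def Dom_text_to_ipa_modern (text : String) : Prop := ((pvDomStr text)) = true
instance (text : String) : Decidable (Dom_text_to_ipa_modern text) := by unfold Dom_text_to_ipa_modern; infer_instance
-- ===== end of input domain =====

set_option maxRecDepth 100000

-- B replaces A's hard-coded trigraph/digraph/single-char cascade by a precomputed index from
-- first character to that character's n-gram pairs sorted by descending key length (objective: alternative).

-- ===== PORT A =====
-- the dict literal of A, in source order (duplicate keys 'ee'/'oo' kept; Dict.ofList overwrites like Python)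
def ipaPairs : List (List Char × List Char) := [
  (['a'], ['æ']),
  (['e'], ['ɛ']),
  (['i'], ['ɪ']),
  (['o'], ['ɒ']),
  (['u'], ['ʌ']),
  (['a', 'a'], ['ɑ', 'ː']),
  (['e', 'e'], ['i', 'ː']),
  (['i', 'i'], ['a', 'ɪ']),
  (['o', 'o'], ['u', 'ː']),
  (['u', 'u'], ['u', 'ː']),
  (['b'], ['b']),
  (['c'], ['k']),
  (['d'], ['d']),
  (['f'], ['f']),
  (['g'], ['ɡ']),
  (['h'], ['h']),
  (['j'], ['d', 'ʒ']),
  (['k'], ['k']),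
  (['l'], ['l']),
  (['m'], ['m']),
  (['n'], ['n']),
  (['p'], ['p']),
  (['q'], ['k']),
  (['r'], ['ɹ']),
  (['s'], ['s']),
  (['t'], ['t']),
  (['v'], ['v']),
  (['w'], ['w']),
  (['x'], ['k', 's']),
  (['y'], ['j']),
  (['z'], ['z']),
  (['t', 'h'], ['θ']),
  (['c', 'h'], ['t', 'ʃ']),
  (['s', 'h'], ['ʃ']),
  (['p', 'h'], ['f']),
  (['w', 'h'], ['ʍ']),
  (['c', 'k'], ['k']),
  (['q', 'u'], ['k', 'w']),
  (['n', 'g'], ['ŋ']),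
  (['g', 'h'], ['ɡ']),
  (['s', 'c'], ['s', 'k']),
  (['s', 'c', 'h'], ['s', 'k']),
  (['s', 'c', 'r'], ['s', 'k', 'ɹ']),
  (['s', 'h', 'r'], ['ʃ', 'ɹ']),
  (['t', 'h', 'r'], ['θ', 'ɹ']),
  (['a', 'i'], ['e', 'ɪ']),
  (['a', 'y'], ['e', 'ɪ']),
  (['a', 'u'], ['ɔ', 'ː']),
  (['a', 'w'], ['ɔ', 'ː']),
  (['e', 'a'], ['i', 'ː']),
  (['e', 'e'], ['i', 'ː']),
  (['e', 'i'], ['a', 'ɪ']),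
  (['e', 'y'], ['a', 'ɪ']),
  (['i', 'e'], ['a', 'ɪ']),
  (['o', 'a'], ['ə', 'ʊ']),
  (['o', 'o'], ['u', 'ː']),
  (['o', 'u'], ['a', 'ʊ']),
  (['o', 'w'], ['a', 'ʊ']),
  (['u', 'e'], ['u', 'ː']),
  (['u', 'i'], ['a', 'ɪ']),
  (['e', 'w'], ['j', 'u', 'ː']),
  (['o', 'i'], ['ɔ', 'ɪ']),
  (['o', 'y'], ['ɔ', 'ɪ']),
  (['a', 'r'], ['ɑ', 'ː']),
  (['e', 'r'], ['ɜ', 'ː']),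
  (['i', 'r'], ['ɜ', 'ː']),
  (['o', 'r'], ['ɔ', 'ː']),
  (['u', 'r'], ['ɜ', 'ː']),
  (['k', 'n'], ['n']),
  (['g', 'n'], ['n']),
  (['w', 'r'], ['ɹ']),
  (['m', 'b'], ['m']),
  (['t', 'h', 'e'], ['ð', 'ə']),
  (['a', 'n', 'd'], ['ə', 'n', 'd']),
  (['o', 'f'], ['ə', 'v']),
  (['t', 'o'], ['t', 'u']),
  (['i', 'n'], ['ɪ', 'n']),
  (['i', 's'], ['ɪ', 'z']),
  (['i', 't'], ['ɪ', 't']),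
  (['y', 'o', 'u'], ['j', 'u', 'ː']),
  (['h', 'e'], ['h', 'i', 'ː']),
  (['s', 'h', 'e'], ['ʃ', 'i', 'ː']),
  (['w', 'e'], ['w', 'i', 'ː']),
  (['t', 'h', 'e', 'y'], ['ð', 'e', 'ɪ']),
  (['a', 'r', 'e'], ['ɑ', 'ː']),
  (['w', 'a', 's'], ['w', 'ɒ', 'z']),
  (['w', 'e', 'r', 'e'], ['w', 'ɜ', 'ː']),
  (['h', 'a', 'v', 'e'], ['h', 'æ', 'v']),
  (['h', 'a', 's'], ['h', 'æ', 'z']),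
  (['h', 'a', 'd'], ['h', 'æ', 'd']),
  (['d', 'o'], ['d', 'u', 'ː']),
  (['d', 'o', 'e', 's'], ['d', 'ʌ', 'z']),
  (['d', 'i', 'd'], ['d', 'ɪ', 'd']),
  (['w', 'i', 'l', 'l'], ['w', 'ɪ', 'l']),
  (['w', 'o', 'u', 'l', 'd'], ['w', 'ʊ', 'd']),
  (['c', 'a', 'n'], ['k', 'æ', 'n']),
  (['c', 'o', 'u', 'l', 'd'], ['k', 'ʊ', 'd']),
  (['s', 'h', 'a', 'l', 'l'], ['ʃ', 'æ', 'l']),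
  (['s', 'h', 'o', 'u', 'l', 'd'], ['ʃ', 'ʊ', 'd']),
  (['m', 'a', 'y'], ['m', 'e', 'ɪ']),
  (['m', 'i', 'g', 'h', 't'], ['m', 'a', 'ɪ', 't']),
  (['m', 'u', 's', 't'], ['m', 'ʌ', 's', 't']),
  (['o', 'u', 'g', 'h', 't'], ['ɔ', 'ː', 't']),
  (['n', 'e', 'e', 'd'], ['n', 'i', 'ː', 'd'])
]

def ipaMap : PySem.Dict (List Char) (List Char) := PySem.Dict.ofList ipaPairs

-- A's inner while loop over clean_word; the index i is represented by the suffix s = clean_word[i:],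
-- so clean_word[i:i+3] = s.take 3 and the guard i <= len-3 = (3 ≤ s.length) = (2 ≤ rest.length).
set_option maxRecDepth 4000 in
def loopA : List Char → List Char
  | [] => []
  | c :: rest =>
    match (if 2 ≤ rest.length then ipaMap.get? ((c :: rest).take 3) else none) with
    | some v => v ++ loopA (rest.drop 2)
    | none =>
      match (if 1 ≤ rest.length then ipaMap.get? ((c :: rest).take 2) else none) with
      | some v => v ++ loopA (rest.drop 1)
      | none =>
        match ipaMap.get? [c] with
        | some v => v ++ loopA rest
        | none => (if PySem.Chars.isalpha c then [c] else []) ++ loopA rest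
  termination_by s => s.length
  decreasing_by all_goals (simp [List.length_drop]; try omega)

-- one word of A's outer loop
def procA (acc : List (List Char)) (w : List Char) : List (List Char) :=
  let clean := w.filter (fun ch => PySem.Chars.isalnum ch)
  let punct := w.filter (fun ch => !PySem.Chars.isalnum ch)
  if clean = [] then
    (if punct ≠ [] then acc ++ [punct] else acc)
  else
    let ipa := loopA clean
    let ipa := if punct ≠ [] then ipa ++ punct else ipa
    acc ++ [ipa]

def text_to_ipa_modern (text : String) : String :=
  let t := PySem.Chars.strip (PySem.Chars.lower text.toList)
  let words := PySem.Chars.split₀ t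
  String.ofList (PySem.Chars.join [' '] (words.foldl procA []))

-- ===== PORT B =====
-- B's dict literal, in source order (duplicates 'ee'/'oo' kept; Dict.ofList overwrites like Python)
def pairsB : List (String × String) := [
  ("a", "æ"), ("e", "ɛ"), ("i", "ɪ"), ("o", "ɒ"), ("u", "ʌ"),
  ("aa", "ɑː"), ("ee", "iː"), ("ii", "aɪ"), ("oo", "uː"), ("uu", "uː"),
  ("b", "b"), ("c", "k"), ("d", "d"), ("f", "f"), ("g", "ɡ"),
  ("h", "h"), ("j", "dʒ"), ("k", "k"), ("l", "l"), ("m", "m"),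
  ("n", "n"), ("p", "p"), ("q", "k"), ("r", "ɹ"), ("s", "s"),
  ("t", "t"), ("v", "v"), ("w", "w"), ("x", "ks"), ("y", "j"), ("z", "z"),
  ("th", "θ"), ("ch", "tʃ"), ("sh", "ʃ"), ("ph", "f"), ("wh", "ʍ"),
  ("ck", "k"), ("qu", "kw"), ("ng", "ŋ"), ("gh", "ɡ"), ("sc", "sk"),
  ("sch", "sk"), ("scr", "skɹ"), ("shr", "ʃɹ"), ("thr", "θɹ"),
  ("ai", "eɪ"), ("ay", "eɪ"), ("au", "ɔː"), ("aw", "ɔː"),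
  ("ea", "iː"), ("ee", "iː"), ("ei", "aɪ"), ("ey", "aɪ"),
  ("ie", "aɪ"), ("oa", "əʊ"), ("oo", "uː"), ("ou", "aʊ"), ("ow", "aʊ"),
  ("ue", "uː"), ("ui", "aɪ"), ("ew", "juː"), ("oi", "ɔɪ"), ("oy", "ɔɪ"),
  ("ar", "ɑː"), ("er", "ɜː"), ("ir", "ɜː"), ("or", "ɔː"), ("ur", "ɜː"),
  ("kn", "n"), ("gn", "n"), ("wr", "ɹ"), ("mb", "m"),
  ("the", "ðə"), ("and", "ənd"), ("of", "əv"), ("to", "tu"), ("in", "ɪn"),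
  ("is", "ɪz"), ("it", "ɪt"), ("you", "juː"), ("he", "hiː"), ("she", "ʃiː"),
  ("we", "wiː"), ("they", "ðeɪ"), ("are", "ɑː"), ("was", "wɒz"), ("were", "wɜː"),
  ("have", "hæv"), ("has", "hæz"), ("had", "hæd"), ("do", "duː"), ("does", "dʌz"),
  ("did", "dɪd"), ("will", "wɪl"), ("would", "wʊd"), ("can", "kæn"), ("could", "kʊd"),
  ("shall", "ʃæl"), ("should", "ʃʊd"), ("may", "meɪ"), ("might", "maɪt"),
  ("must", "mʌst"), ("ought", "ɔːt"), ("need", "niːd")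
]

def ipaMapB : PySem.Dict String String := PySem.Dict.ofList pairsB

-- index = {}; for k, v in ipa_map.items(): if len(k) <= 3: index.setdefault(k[0], []).append((k, v))
-- (k[0]: every key of the dict is nonempty, so headD's default is never used)
def indexRawB : PySem.Dict Char (List (String × String)) :=
  ipaMapB.items.foldl
    (fun d kv =>
      if PySem.Str.len kv.1 ≤ 3 then
        let ch := kv.1.toList.headD ' '
        d.insert ch (d.getD ch [] ++ [kv])
      else d)
    PySem.Dict.empty

-- for lst in index.values(): lst.sort(key=lambda kv: len(kv[0]), reverse=True)
def indexB : PySem.Dict Char (List (String × String)) :=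
  indexRawB.keys.foldl
    (fun d ch => d.modify ch [] (fun l => PySem.List.sorted l (fun kv => PySem.Str.len kv.1) true))
    indexRawB

-- needed by loopB's termination: every indexed key is a nonempty string
set_option maxRecDepth 100000 in
theorem indexB_values_key_pos :
    ∀ l ∈ PySem.Dict.values indexB, ∀ kv ∈ l, 1 ≤ kv.1.toList.length := by decide

theorem bucket_key_pos (c : Char) (kv : String × String)
    (h : kv ∈ indexB.getD c []) : 1 ≤ kv.1.toList.length := by
  rw [PySem.Dict.getD_eq_get?_getD] at h
  cases hg : indexB.get? c with
  | none => rw [hg] at h; simp at h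
  | some l =>
      rw [hg] at h
      exact indexB_values_key_pos l
        (List.mem_map.mpr ⟨(c, l), PySem.Dict.mem_items_of_get?_eq_some indexB hg, rfl⟩) kv h

-- B's inner while loop: one bucket lookup by first char, first (key, value) whose key is a
-- prefix of the remaining suffix s = clean_word[i:] (clean_word.startswith(k, i))
set_option maxRecDepth 100000 in
def loopB : List Char → List Char
  | [] => []
  | c :: rest =>
    match hf : (indexB.getD c []).find? (fun kv => PySem.Chars.startswith (c :: rest) kv.1.toList) with
    | some kv => kv.2.toList ++ loopB ((c :: rest).drop kv.1.toList.length)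
    | none => (if PySem.Chars.isalpha c then [c] else []) ++ loopB rest
  termination_by s => s.length
  decreasing_by
    · have hp := bucket_key_pos c _ (List.mem_of_find?_eq_some hf)
      simp only [List.length_drop, List.length_cons]
      omega
    · simp

-- one word of B's outer loop ( ''.join(pieces) is the concatenation loopB builds )
def procB (acc : List (List Char)) (w : List Char) : List (List Char) :=
  let clean := w.filter (fun ch => PySem.Chars.isalnum ch)
  let punct := w.filter (fun ch => !PySem.Chars.isalnum ch)
  if clean = [] then
    (if punct ≠ [] then acc ++ [punct] else acc)
  else
    acc ++ [loopB clean ++ punct]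

def text_to_ipa_modern_alt (text : String) : String :=
  let t := PySem.Chars.strip (PySem.Chars.lower text.toList)
  let words := PySem.Chars.split₀ t
  String.ofList (PySem.Chars.join [' '] (words.foldl procB []))

-- ===== PRECONDITION & SPEC =====
def Spec_text_to_ipa_modern (text : String) (out : String) : Prop := out = text_to_ipa_modern_alt text
instance (text : String) (out : String) : Decidable (Spec_text_to_ipa_modern text out) := by unfold Spec_text_to_ipa_modern; infer_instance

-- ===== CLAIM (what is proved, stated in full; the proofs are below) =====
def Claim_equal_text_to_ipa_modern : Prop := ∀ (text : String), Dom_text_to_ipa_modern text → Spec_text_to_ipa_modern text (text_to_ipa_modern text)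

-- ===== LEMMAS AND PROOFS =====

-- proof-only helpers: the indexed (key, value) pairs of a given key length, in dict order
def itemsL (n : Nat) : List (String × String) :=
  (PySem.Dict.items ipaMapB).filter (fun kv => kv.1.toList.length == n)

def flatB : List (String × String) := itemsL 3 ++ itemsL 2 ++ itemsL 1

-- every bucket of indexB holds exactly the flatB entries whose key starts with that char
set_option maxRecDepth 100000 in
theorem indexB_items_eq :
    ∀ p ∈ PySem.Dict.items indexB,
      p.2 = flatB.filter (fun kv => kv.1.toList.head? == some p.1) := by decide

set_option maxRecDepth 100000 in
theorem flatB_heads :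
    ∀ kv ∈ flatB, kv.1.toList ≠ [] ∧ kv.1.toList.headD ' ' ∈ PySem.Dict.keys indexB := by decide

set_option maxRecDepth 100000 in
theorem flatB_complete :
    ∀ k ∈ PySem.Dict.keys ipaMap, k.length ≤ 3 →
      ((itemsL k.length).find? (fun kv => kv.1.toList == k)).isSome := by decide

theorem find?_filter_comm {α : Type} (l : List α) (q p : α → Bool) :
    (l.filter q).find? p = l.find? (fun x => q x && p x) := by
  induction l with
  | nil => rfl
  | cons a l ih =>
    by_cases hq : q a = true
    · by_cases hp : p a = true
      · simp [hq, hp]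
      · simp only [Bool.not_eq_true] at hp
        simp [hq, hp, ih]
    · simp only [Bool.not_eq_true] at hq
      simp [hq, ih]

theorem find?_congr_mem {α : Type} (l : List α) (p q : α → Bool)
    (h : ∀ x ∈ l, p x = q x) : l.find? p = l.find? q := by
  induction l with
  | nil => rfl
  | cons a l ih =>
    have ha := h a (by simp)
    by_cases hp : p a = true
    · rw [List.find?_cons_of_pos hp, List.find?_cons_of_pos (ha ▸ hp)]
    · simp only [Bool.not_eq_true] at hp
      rw [List.find?_cons_of_neg (by simp [hp]), List.find?_cons_of_neg (by simp [← ha, hp]),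
        ih (fun x hx => h x (by simp [hx]))]

theorem bucket_eq (c : Char) :
    indexB.getD c [] = flatB.filter (fun kv => kv.1.toList.head? == some c) := by
  rw [PySem.Dict.getD_eq_get?_getD]
  cases hg : indexB.get? c with
  | some l =>
      simpa using indexB_items_eq (c, l) (PySem.Dict.mem_items_of_get?_eq_some indexB hg)
  | none =>
      have hc : c ∉ PySem.Dict.keys indexB :=
        (PySem.Dict.get?_eq_none_iff_not_mem_keys ..).mp hg
      simp only [Option.getD_none]
      refine ((List.filter_eq_nil_iff).mpr ?_).symm
      intro kv hkv hb
      obtain ⟨hne, hmem⟩ := flatB_heads kv hkv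
      apply hc
      cases hl : kv.1.toList with
      | nil => exact absurd hl hne
      | cons x xs =>
        have hx : x = c := by simpa [hl] using hb
        rw [← hx]
        simpa [hl] using hmem

theorem itemsL_len (n : Nat) : ∀ kv ∈ itemsL n, kv.1.toList.length = n := by
  intro kv h
  simpa using (List.mem_filter.mp h).2

set_option maxRecDepth 100000 in
theorem items_sound :
    ∀ kv ∈ PySem.Dict.items ipaMapB, ipaMap.get? kv.1.toList = some kv.2.toList := by decide

-- in a list of pairs whose keys all have length n, "key is a prefix of s" is "key = s.take n"
theorem find?_fixedlen (n : Nat) (P : List (String × String))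
    (hP : ∀ kv ∈ P, kv.1.toList.length = n) (s : List Char) :
    P.find? (fun kv => PySem.Chars.startswith s kv.1.toList)
      = P.find? (fun kv => kv.1.toList == s.take n) := by
  refine find?_congr_mem _ _ _ (fun kv hkv => ?_)
  have hl := hP kv hkv
  by_cases h : kv.1.toList = s.take n
  · rw [h]
    have hs : PySem.Chars.startswith s (List.take n s) = true :=
      (PySem.Chars.startswith_iff s _).mpr (List.take_prefix n s)
    simp [hs]
  · have hs : PySem.Chars.startswith s kv.1.toList = false := by
      rw [Bool.eq_false_iff]
      intro hs
      exact h (by rw [List.prefix_iff_eq_take.mp ((PySem.Chars.startswith_iff s _).mp hs), hl])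
    simp [hs, h]

theorem itemsL_find_some (n : Nat) (t : List Char) (ht : t.length = n) (hn : n ≤ 3)
    (v : List Char) (hv : ipaMap.get? t = some v) :
    ∃ kv, (itemsL n).find? (fun kv => kv.1.toList == t) = some kv ∧
      kv.1.toList = t ∧ kv.2.toList = v := by
  have hmem : t ∈ PySem.Dict.keys ipaMap := by
    by_contra h
    rw [(PySem.Dict.get?_eq_none_iff_not_mem_keys ..).mpr h] at hv
    cases hv
  have hsome := flatB_complete t hmem (by omega)
  rw [ht] at hsome
  obtain ⟨kv, hkv⟩ := Option.isSome_iff_exists.mp hsome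
  have hk : kv.1.toList = t := by simpa using List.find?_some hkv
  have hs := items_sound kv (List.mem_of_mem_filter (List.mem_of_find?_eq_some hkv))
  rw [hk, hv] at hs
  exact ⟨kv, hkv, hk, (Option.some_inj.mp hs).symm⟩

theorem itemsL_find_none (n : Nat) (t : List Char)
    (h : ipaMap.get? t = none ∨ t.length ≠ n) :
    (itemsL n).find? (fun kv => kv.1.toList == t) = none := by
  cases hf : (itemsL n).find? (fun kv => kv.1.toList == t) with
  | none => rfl
  | some kv =>
    exfalso
    have hk : kv.1.toList = t := by simpa using List.find?_some hf
    have hmem := List.mem_of_find?_eq_some hf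
    have hlen := itemsL_len n kv hmem
    have hs := items_sound kv (List.mem_of_mem_filter hmem)
    rw [hk] at hs hlen
    rcases h with h | h
    · rw [h] at hs; cases hs
    · exact h hlen

theorem step_eq (c : Char) (rest : List Char)
    (IH : ∀ t : List Char, t.length ≤ rest.length → loopA t = loopB t) :
    loopA (c :: rest) = loopB (c :: rest) := by
  have magree : ∀ kv ∈ flatB,
      ((kv.1.toList.head? == some c) && PySem.Chars.startswith (c :: rest) kv.1.toList)
        = PySem.Chars.startswith (c :: rest) kv.1.toList := by
    intro kv hkv
    cases hs : PySem.Chars.startswith (c :: rest) kv.1.toList with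
    | false => simp
    | true =>
      have hpre := (PySem.Chars.startswith_iff _ _).mp hs
      obtain ⟨hne, -⟩ := flatB_heads kv hkv
      cases hl : kv.1.toList with
      | nil => exact absurd hl hne
      | cons x xs =>
        rw [hl] at hpre
        obtain ⟨t, ht⟩ := hpre
        have hx : x = c := (List.cons.injEq .. ▸ ht).1
        simp [hx]
  have hfind : (indexB.getD c []).find? (fun kv => PySem.Chars.startswith (c :: rest) kv.1.toList)
      = (((itemsL 3).find? (fun kv => kv.1.toList == (c :: rest).take 3)).or
        (((itemsL 2).find? (fun kv => kv.1.toList == (c :: rest).take 2)).or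
         ((itemsL 1).find? (fun kv => kv.1.toList == (c :: rest).take 1)))) := by
    rw [bucket_eq, find?_filter_comm, find?_congr_mem _ _ _ magree,
        show flatB = itemsL 3 ++ (itemsL 2 ++ itemsL 1) from by simp [flatB],
        List.find?_append, List.find?_append,
        find?_fixedlen 3 _ (itemsL_len 3), find?_fixedlen 2 _ (itemsL_len 2),
        find?_fixedlen 1 _ (itemsL_len 1)]
  rw [loopA, loopB, hfind]
  by_cases hr3 : 2 ≤ rest.length
  · rw [if_pos hr3]
    cases hv3 : ipaMap.get? ((c :: rest).take 3) with
    | some v =>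
      obtain ⟨kv, hkv, hk, hval⟩ := itemsL_find_some 3 _ (by simp; omega) (by omega) v hv3
      rw [hkv]
      simp only [Option.some_or]
      have hklen : kv.1.toList.length = 3 := by rw [hk]; simp; omega
      rw [hval, hklen, show (c :: rest).drop 3 = rest.drop 2 from rfl]
      exact congrArg (v ++ ·) (IH _ (by simp))
    | none =>
      rw [itemsL_find_none 3 _ (Or.inl hv3)]
      simp only [Option.none_or]
      by_cases hr2 : 1 ≤ rest.length
      · rw [if_pos hr2]
        cases hv2 : ipaMap.get? ((c :: rest).take 2) with
        | some v =>
          obtain ⟨kv, hkv, hk, hval⟩ := itemsL_find_some 2 _ (by simp; omega) (by omega) v hv2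
          rw [hkv]
          simp only [Option.some_or]
          have hklen : kv.1.toList.length = 2 := by rw [hk]; simp; omega
          rw [hval, hklen, show (c :: rest).drop 2 = rest.drop 1 from rfl]
          exact congrArg (v ++ ·) (IH _ (by simp))
        | none =>
          rw [itemsL_find_none 2 _ (Or.inl hv2)]
          simp only [Option.none_or]
          cases hv1 : ipaMap.get? ((c :: rest).take 1) with
          | some v =>
            obtain ⟨kv, hkv, hk, hval⟩ := itemsL_find_some 1 _ (by simp) (by omega) v hv1
            have hv1' : ipaMap.get? [c] = some v := hv1
            rw [hv1', hkv]
            show v ++ loopA rest = kv.2.toList ++ loopB (List.drop kv.1.toList.length (c :: rest))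
            have hklen : kv.1.toList.length = 1 := by rw [hk]; simp
            rw [hval, hklen]
            exact congrArg (v ++ ·) (IH _ le_rfl)
          | none =>
            have hv1' : ipaMap.get? [c] = none := hv1
            rw [hv1', itemsL_find_none 1 _ (Or.inl hv1)]
            show (if PySem.Chars.isalpha c = true then [c] else []) ++ loopA rest
                = (if PySem.Chars.isalpha c = true then [c] else []) ++ loopB rest
            exact congrArg _ (IH _ le_rfl)
      · exfalso; omega
  · rw [if_neg hr3, itemsL_find_none 3 _ (Or.inr (by simp; omega))]
    simp only [Option.none_or]
    by_cases hr2 : 1 ≤ rest.length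
    · rw [if_pos hr2]
      cases hv2 : ipaMap.get? ((c :: rest).take 2) with
      | some v =>
        obtain ⟨kv, hkv, hk, hval⟩ := itemsL_find_some 2 _ (by simp; omega) (by omega) v hv2
        rw [hkv]
        simp only [Option.some_or]
        have hklen : kv.1.toList.length = 2 := by rw [hk]; simp; omega
        rw [hval, hklen, show (c :: rest).drop 2 = rest.drop 1 from rfl]
        exact congrArg (v ++ ·) (IH _ (by simp))
      | none =>
        rw [itemsL_find_none 2 _ (Or.inl hv2)]
        simp only [Option.none_or]
        cases hv1 : ipaMap.get? ((c :: rest).take 1) with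
        | some v =>
          obtain ⟨kv, hkv, hk, hval⟩ := itemsL_find_some 1 _ (by simp) (by omega) v hv1
          have hv1' : ipaMap.get? [c] = some v := hv1
          rw [hv1', hkv]
          show v ++ loopA rest = kv.2.toList ++ loopB (List.drop kv.1.toList.length (c :: rest))
          have hklen : kv.1.toList.length = 1 := by rw [hk]; simp
          rw [hval, hklen]
          exact congrArg (v ++ ·) (IH _ le_rfl)
        | none =>
          have hv1' : ipaMap.get? [c] = none := hv1
          rw [hv1', itemsL_find_none 1 _ (Or.inl hv1)]
          show (if PySem.Chars.isalpha c = true then [c] else []) ++ loopA rest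
              = (if PySem.Chars.isalpha c = true then [c] else []) ++ loopB rest
          exact congrArg _ (IH _ le_rfl)
    · rw [if_neg hr2, itemsL_find_none 2 _ (Or.inr (by simp only [List.length_take, List.length_cons]; omega))]
      simp only [Option.none_or]
      cases hv1 : ipaMap.get? ((c :: rest).take 1) with
      | some v =>
        obtain ⟨kv, hkv, hk, hval⟩ := itemsL_find_some 1 _ (by simp) (by omega) v hv1
        have hv1' : ipaMap.get? [c] = some v := hv1
        rw [hv1', hkv]
        show v ++ loopA rest = kv.2.toList ++ loopB (List.drop kv.1.toList.length (c :: rest))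
        have hklen : kv.1.toList.length = 1 := by rw [hk]; simp
        rw [hval, hklen]
        exact congrArg (v ++ ·) (IH _ le_rfl)
      | none =>
        have hv1' : ipaMap.get? [c] = none := hv1
        rw [hv1', itemsL_find_none 1 _ (Or.inl hv1)]
        show (if PySem.Chars.isalpha c = true then [c] else []) ++ loopA rest
            = (if PySem.Chars.isalpha c = true then [c] else []) ++ loopB rest
        exact congrArg _ (IH _ le_rfl)

theorem loop_eq (s : List Char) : loopA s = loopB s := by
  suffices H : ∀ n (t : List Char), t.length ≤ n → loopA t = loopB t from H s.length s le_rfl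
  intro n
  induction n with
  | zero =>
    intro t ht
    have : t = [] := List.eq_nil_of_length_eq_zero (Nat.le_zero.1 ht)
    simp [this, loopA, loopB]
  | succ n ihn =>
    intro t ht
    match t with
    | [] => simp [loopA, loopB]
    | c :: rest =>
      exact step_eq c rest (fun u hu => ihn u (by simp at ht; omega))

theorem proc_eq : procA = procB := by
  funext acc w
  simp only [procA, procB, loop_eq]
  split_ifs <;> simp_all [List.filter_eq_nil_iff]

-- ===== VERDICT (by name: the statement is the Claim_ definition above) =====
theorem text_to_ipa_modern_spec : Claim_equal_text_to_ipa_modern := by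
  intro text _
  show _ = _
  simp only [text_to_ipa_modern, text_to_ipa_modern_alt, proc_eq]
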